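-- pv_equiv track=rewrite | github.com/RasheedLewis/VibeCraft | backend/app/services/section_inference.py | _cluster_similar_labels
-- ===== SOURCE A (Python) =====
-- from typing import Dict, Iterable, List, Literal, Optional
--
-- def _cluster_similar_labels(labels: List[int], similarity_threshold: int) -> Dict[int, int]:
--     """
--     Cluster labels that are within similarity_threshold distance.
--
--     Returns a mapping from original label to cluster representative (lowest label in cluster).
--
--     Args:
--         labels: List of Audjust label values (0-1000)
--         similarity_threshold: Max distance between labels to be considered similar
--
--     Returns:
--         Dict mapping each label to its cluster representative
--     """
--     unique_labels = sorted(set(labels))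
--     if not unique_labels:
--         return {}
--
--     # Group labels into clusters using a simple greedy approach
--     clusters: Dict[int, int] = {}  # label -> cluster_representative
--
--     for label in unique_labels:
--         # Check if this label is close to any existing cluster representative
--         assigned = False
--         for cluster_rep in sorted(set(clusters.values())):
--             if abs(label - cluster_rep) <= similarity_threshold:
--                 clusters[label] = cluster_rep
--                 assigned = True
--                 break
--
--         # If not close to any existing cluster, create a new cluster
--         if not assigned:
--             clusters[label] = label
--
--     return clusters
-- ===== SOURCE B (Python) =====
-- from bisect import bisect_left
-- from typing import Dict, List
--
--
-- def _cluster_similar_labels(labels: List[int], similarity_threshold: int) -> Dict[int, int]: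
--     # Processing unique labels in ascending order, every existing cluster
--     # representative is below the current label, so "closest-first existing rep
--     # within threshold" is simply the smallest rep >= label - threshold: one
--     # bisect on the (already sorted, append-only) rep list per label.
--     clusters: Dict[int, int] = {}
--     reps: List[int] = []
--     for label in sorted(set(labels)):
--         i = bisect_left(reps, label - similarity_threshold)
--         if i < len(reps):
--             clusters[label] = reps[i]
--         else:
--             reps.append(label)
--             clusters[label] = label
--     return clusters
-- ===== Notes on version B (the rewrite author's own statement) =====
-- stated objective: faster
-- what changed: Instead of rebuilding and sorting the set of cluster representatives and scanning it linearly for every label, B keeps the representatives in an append-only sorted list and finds the assigned representative (the smallest rep >= label - threshold, which is exactly the first match of A's scan since all reps are below the current label) with one bisect per label.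
import Mathlib
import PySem

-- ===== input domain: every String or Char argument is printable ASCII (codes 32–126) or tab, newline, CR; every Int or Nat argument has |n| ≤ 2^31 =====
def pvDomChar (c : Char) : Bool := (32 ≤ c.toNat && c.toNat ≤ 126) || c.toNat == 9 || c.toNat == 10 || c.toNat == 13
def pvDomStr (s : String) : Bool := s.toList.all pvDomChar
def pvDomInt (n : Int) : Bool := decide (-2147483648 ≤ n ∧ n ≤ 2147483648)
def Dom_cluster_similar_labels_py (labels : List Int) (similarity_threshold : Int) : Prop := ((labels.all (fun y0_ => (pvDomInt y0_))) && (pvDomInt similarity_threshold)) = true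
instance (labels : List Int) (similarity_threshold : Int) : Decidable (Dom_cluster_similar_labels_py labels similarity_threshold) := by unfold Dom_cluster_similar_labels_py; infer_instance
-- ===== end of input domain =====

-- B replaces A's per-label rebuild-sort-and-scan of the representative set by one
-- bisect into an append-only sorted representative list (objective: faster).

-- ===== PORT A =====
-- body of A's outer loop: scan sorted(set(clusters.values())) for the first rep within threshold
def pvStepA (similarity_threshold : Int) (clusters : PySem.Dict Int Int) (label : Int) : PySem.Dict Int Int :=
  match (PySem.List.sorted (PySem.Set.ofList (PySem.Dict.values clusters)) id).find?
          (fun cluster_rep => decide (|label - cluster_rep| ≤ similarity_threshold)) with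
  | some cluster_rep => clusters.insert label cluster_rep
  | none => clusters.insert label label

def cluster_similar_labels_py (labels : List Int) (similarity_threshold : Int) : List (Int × Int) :=
  let unique_labels := PySem.List.sorted (PySem.Set.ofList labels) id
  if unique_labels = [] then []
  else (unique_labels.foldl (pvStepA similarity_threshold) ⟨[]⟩).items

-- ===== PORT B =====
-- body of B's loop: bisect the sorted rep list for the smallest rep ≥ label - threshold
def pvStepB (similarity_threshold : Int) (st : PySem.Dict Int Int × List Int) (label : Int) : PySem.Dict Int Int × List Int :=
  let i := PySem.List.bisectLeft st.2 (label - similarity_threshold)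
  if h : i < st.2.length then (st.1.insert label st.2[i], st.2)
  else (st.1.insert label label, st.2 ++ [label])

def cluster_similar_labels_py_alt (labels : List Int) (similarity_threshold : Int) : List (Int × Int) :=
  (((PySem.List.sorted (PySem.Set.ofList labels) id).foldl
      (pvStepB similarity_threshold) (⟨[]⟩, [])).1).items

-- ===== PRECONDITION & SPEC =====
def Spec_cluster_similar_labels_py (labels : List Int) (similarity_threshold : Int) (out : List (Int × Int)) : Prop := out = cluster_similar_labels_py_alt labels similarity_threshold
instance (labels : List Int) (similarity_threshold : Int) (out : List (Int × Int)) : Decidable (Spec_cluster_similar_labels_py labels similarity_threshold out) := by unfold Spec_cluster_similar_labels_py; infer_instance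

-- ===== CLAIM (what is proved, stated in full; the proofs are below) =====
def Claim_equal_cluster_similar_labels_py : Prop := ∀ (labels : List Int) (similarity_threshold : Int), Dom_cluster_similar_labels_py labels similarity_threshold → Spec_cluster_similar_labels_py labels similarity_threshold (cluster_similar_labels_py labels similarity_threshold)

-- ===== LEMMAS AND PROOFS =====

-- inserting a fresh key appends the pair
theorem pv_insert_append (c : PySem.Dict Int Int) (k v : Int)
    (h : ∀ p ∈ c.items, p.1 ≠ k) :
    c.insert k v = ⟨c.items ++ [(k, v)]⟩ := by
  have hc : c.contains k = false := by
    simp only [PySem.Dict.contains]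
    rw [List.any_eq_false]
    exact fun p hp => by simpa using h p hp
  simp [PySem.Dict.insert, hc]

-- on a sorted rep list whose members all lie below `l`, A's linear scan for the
-- first rep within threshold is the bisect for the smallest rep ≥ l - t
theorem pv_find_eq_bisect (reps : List Int) (l t : Int)
    (hs : reps.Pairwise (· ≤ ·)) (hlt : ∀ r ∈ reps, r < l) :
    reps.find? (fun r => decide (|l - r| ≤ t)) =
      if h : PySem.List.bisectLeft reps (l - t) < reps.length then
        some reps[PySem.List.bisectLeft reps (l - t)] else none := by
  obtain ⟨hle, hlo, hhi⟩ := PySem.List.bisectLeft_spec reps (l - t) hs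
  by_cases h : PySem.List.bisectLeft reps (l - t) < reps.length
  · rw [dif_pos h, List.find?_eq_some_iff_getElem]
    refine ⟨?_, PySem.List.bisectLeft reps (l - t), h, rfl, ?_⟩
    · have h1 := hhi _ h le_rfl
      have h2 := hlt _ (List.getElem_mem h)
      simp only [decide_eq_true_eq, abs_le]
      omega
    · intro j hj
      have h1 := hlo j (lt_trans hj h) hj
      have h2 := hlt _ (List.getElem_mem (lt_trans hj h))
      simp only [Bool.not_eq_eq_eq_not, Bool.not_true, decide_eq_false_iff_not, abs_le]
      omega
  · rw [dif_neg h, List.find?_eq_none]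
    intro r hr
    obtain ⟨j, hj, rfl⟩ := List.mem_iff_getElem.mp hr
    have h1 := hlo j hj (lt_of_lt_of_le hj (not_lt.mp h))
    have h2 := hlt _ (List.getElem_mem hj)
    simp only [decide_eq_true_eq, abs_le]
    omega

-- loop correspondence: A's dict-fold equals the first component of B's fold,
-- given that `reps` is the sorted set of values of `c` and everything seen so far
-- lies strictly below everything still to be processed
theorem pv_loop (t : Int) : ∀ (L : List Int) (c : PySem.Dict Int Int) (reps : List Int),
    L.Pairwise (· < ·) →
    reps.Pairwise (· < ·) →
    (∀ r ∈ reps, ∀ l ∈ L, r < l) →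
    (∀ p ∈ c.items, ∀ l ∈ L, p.1 < l) →
    (∀ x, x ∈ PySem.Dict.values c ↔ x ∈ reps) →
    L.foldl (pvStepA t) c = (L.foldl (pvStepB t) (c, reps)).1
  | [], c, reps, _, _, _, _, _ => rfl
  | l :: L', c, reps, hL, hreps, hrl, hkeys, hmem => by
    obtain ⟨hLhead, hLtail⟩ := List.pairwise_cons.mp hL
    have hrepnd : reps.Nodup := hreps.imp ne_of_lt
    have hperm : reps.Perm (PySem.Set.ofList (PySem.Dict.values c)) :=
      (List.perm_ext_iff_of_nodup hrepnd (PySem.Set.nodup_ofList _)).mpr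
        (fun x => by rw [PySem.Set.mem_ofList]; exact (hmem x).symm)
    have hsorted : PySem.List.sorted (PySem.Set.ofList (PySem.Dict.values c)) id = reps :=
      PySem.List.sorted_eq_of_perm_of_pairwise_lt _ reps id hperm hreps
    have hbelow : ∀ r ∈ reps, r < l := fun r hr => hrl r hr l (List.mem_cons_self)
    have hfind := pv_find_eq_bisect reps l t (hreps.imp le_of_lt) hbelow
    have hfresh : ∀ p ∈ c.items, p.1 ≠ l :=
      fun p hp => ne_of_lt (hkeys p hp l (List.mem_cons_self))
    simp only [List.foldl_cons]
    by_cases h : PySem.List.bisectLeft reps (l - t) < reps.length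
    · have hA : pvStepA t c l = c.insert l reps[PySem.List.bisectLeft reps (l - t)] := by
        simp only [pvStepA, hsorted, hfind, dif_pos h]
      have hB : pvStepB t (c, reps) l = (c.insert l reps[PySem.List.bisectLeft reps (l - t)], reps) := by
        simp only [pvStepB]
        rw [dif_pos h]
      rw [hA, hB, pv_insert_append c l _ hfresh]
      refine pv_loop t L' _ reps hLtail hreps
        (fun r hr l' hl' => hrl r hr l' (List.mem_cons_of_mem _ hl')) ?_ ?_
      · intro p hp l' hl'
        rcases List.mem_append.mp hp with hp | hp
        · exact hkeys p hp l' (List.mem_cons_of_mem _ hl')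
        · simp only [List.mem_singleton] at hp
          subst hp
          exact hLhead l' hl'
      · intro x
        simp only [PySem.Dict.values, List.map_append, List.map_cons, List.map_nil,
          List.mem_append, List.mem_singleton]
        constructor
        · rintro (hx | rfl)
          · exact (hmem x).mp hx
          · exact List.getElem_mem h
        · intro hx
          exact Or.inl ((hmem x).mpr hx)
    · have hA : pvStepA t c l = c.insert l l := by
        simp only [pvStepA, hsorted, hfind, dif_neg h]
      have hB : pvStepB t (c, reps) l = (c.insert l l, reps ++ [l]) := by
        simp only [pvStepB]
        rw [dif_neg h]
      rw [hA, hB, pv_insert_append c l _ hfresh]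
      refine pv_loop t L' _ (reps ++ [l]) hLtail ?_ ?_ ?_ ?_
      · exact List.pairwise_append.mpr ⟨hreps, List.pairwise_singleton _ _,
          fun r hr l' hl' => by simp only [List.mem_singleton] at hl'; subst hl'; exact hbelow r hr⟩
      · intro r hr l' hl'
        rcases List.mem_append.mp hr with hr | hr
        · exact hrl r hr l' (List.mem_cons_of_mem _ hl')
        · simp only [List.mem_singleton] at hr; subst hr; exact hLhead l' hl'
      · intro p hp l' hl'
        rcases List.mem_append.mp hp with hp | hp
        · exact hkeys p hp l' (List.mem_cons_of_mem _ hl')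
        · simp only [List.mem_singleton] at hp; subst hp; exact hLhead l' hl'
      · intro x
        simp only [PySem.Dict.values, List.map_append, List.map_cons, List.map_nil,
          List.mem_append, List.mem_singleton]
        exact or_congr_left (hmem x)

-- ===== VERDICT (by name: the statement is the Claim_ definition above) =====
theorem cluster_similar_labels_py_spec : Claim_equal_cluster_similar_labels_py := by
  intro labels t _
  unfold Spec_cluster_similar_labels_py cluster_similar_labels_py cluster_similar_labels_py_alt
  set L := PySem.List.sorted (PySem.Set.ofList labels) id with hLdef
  have hnd : L.Nodup :=
    ((PySem.List.sorted_perm (PySem.Set.ofList labels) id false).nodup_iff).mpr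
      (PySem.Set.nodup_ofList labels)
  have hple : L.Pairwise (· ≤ ·) := by
    rw [hLdef]; exact PySem.List.sorted_pairwise (PySem.Set.ofList labels) id
  have hpl : L.Pairwise (· < ·) :=
    (hple.and hnd).imp (fun h => lt_of_le_of_ne h.1 h.2)
  by_cases hL : L = []
  · simp [hL]
  · rw [if_neg hL]
    exact congrArg PySem.Dict.items
      (pv_loop t L ⟨[]⟩ [] hpl List.Pairwise.nil (by simp) (by simp) (by simp [PySem.Dict.values]))
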